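-- pv_equiv track=rewrite | github.com/hyo-jae-jung/programmers | level2/more_spicy.py | solution
-- ===== SOURCE A (Python) =====
-- import heapq
--
-- def solution(scoville, K):
--     answer = -1
--     heap = []
--     for i in scoville:
--         heapq.heappush(heap,i)
--     temp_answer = 0
--     while len(heap) > 0:
--         if heap[0] < K:
--             if len(heap) > 1:
--                 temp = heap[0]
--                 heapq.heappop(heap)
--                 temp += heap[0]*2
--                 heapq.heappop(heap)
--                 heapq.heappush(heap,temp)
--                 temp_answer += 1
--             else:
--                 heapq.heappop(heap)
--         else:
--             answer = temp_answer
--             break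
--
--     return answer
-- ===== SOURCE B (Python) =====
-- def solution(scoville, K):
--     pot = list(scoville)  # copy: do not mutate the caller's list
--     count = 0
--     while pot:
--         m1 = min(pot)
--         if m1 >= K:
--             return count
--         if len(pot) == 1:
--             return -1
--         pot.remove(m1)
--         m2 = min(pot)
--         pot.remove(m2)
--         pot.append(m1 + 2 * m2)
--         count += 1
--     return -1
-- ===== Notes on version B (the rewrite author's own statement) =====
-- stated objective: simpler
-- what changed: Replaces the binary min-heap (heapq push/pop with sift operations) by a plain list with repeated linear min-scans and first-occurrence removals; same mixing process, no heap structure maintained.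
import Mathlib
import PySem

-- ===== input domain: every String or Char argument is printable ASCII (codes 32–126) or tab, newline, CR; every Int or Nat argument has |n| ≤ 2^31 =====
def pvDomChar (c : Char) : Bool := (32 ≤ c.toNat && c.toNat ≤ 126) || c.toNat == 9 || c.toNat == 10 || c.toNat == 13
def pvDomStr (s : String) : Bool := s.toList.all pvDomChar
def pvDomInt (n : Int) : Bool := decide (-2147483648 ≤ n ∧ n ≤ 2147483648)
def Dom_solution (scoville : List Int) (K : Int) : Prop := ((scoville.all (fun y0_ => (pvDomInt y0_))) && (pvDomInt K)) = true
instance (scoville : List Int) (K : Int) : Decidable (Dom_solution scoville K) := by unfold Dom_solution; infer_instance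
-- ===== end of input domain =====

-- B replaces A's binary min-heap by a plain list with linear min-scans (simpler, not faster);
-- return-value equivalence only: A mutates only its own local heap, B copies the input list.

-- ===== PORT A =====
-- Faithful port of CPython heapq._siftdown(heap, startpos, pos) with newitem = heap[pos]
-- passed explicitly (every exit path of the Python loop overwrites heap[pos], so the
-- initial stale value at pos is never read).  fuel is only a totality guard: pos strictly
-- decreases each iteration, so fuel = pos + 1 (supplied by pyHeapSiftdown) never runs out.
def siftdownGo : Nat → List Int → Nat → Nat → Int → List Int
  | 0, heap, _, pos, newitem => heap.set pos newitem
  | fuel + 1, heap, startpos, pos, newitem =>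
    if startpos < pos then
      let parentpos := (pos - 1) / 2
      let parent := heap.getD parentpos 0
      if newitem < parent then siftdownGo fuel (heap.set pos parent) startpos parentpos newitem
      else heap.set pos newitem
    else heap.set pos newitem

def pyHeapSiftdown (heap : List Int) (startpos pos : Nat) (newitem : Int) : List Int :=
  siftdownGo (pos + 1) heap startpos pos newitem

-- Faithful port of CPython heapq._siftup(heap, pos) (startpos and newitem made explicit).
-- fuel is only a totality guard: the hole index grows each iteration, so
-- fuel = heap.length + 1 (supplied by pyHeapSiftup) never runs out; the fuel-0 arm
-- coincides with the loop-exit action.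
def siftupGo : Nat → List Int → Nat → Nat → Int → List Int
  | 0, heap, startpos, pos, newitem => pyHeapSiftdown (heap.set pos newitem) startpos pos newitem
  | fuel + 1, heap, startpos, pos, newitem =>
    if 2 * pos + 1 < heap.length then
      let childpos := 2 * pos + 1
      let rightpos := childpos + 1
      let childpos' :=
        if rightpos < heap.length ∧ ¬ (heap.getD childpos 0 < heap.getD rightpos 0) then
          rightpos
        else childpos
      siftupGo fuel (heap.set pos (heap.getD childpos' 0)) startpos childpos' newitem
    else pyHeapSiftdown (heap.set pos newitem) startpos pos newitem

def pyHeapSiftup (heap : List Int) (startpos pos : Nat) (newitem : Int) : List Int :=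
  siftupGo (heap.length + 1) heap startpos pos newitem

-- heapq.heappush
def pyHeappush (heap : List Int) (item : Int) : List Int :=
  pyHeapSiftdown (heap ++ [item]) 0 heap.length item

-- heapq.heappop; Python raises IndexError on an empty heap — A only calls it with
-- len(heap) > 0, the 'none' arm is unreachable there.
def pyHeappop (heap : List Int) : Int × List Int :=
  match heap.getLast? with
  | none => (0, [])
  | some lastelt =>
    let rest := heap.dropLast
    if rest.isEmpty then (lastelt, [])
    else (rest.getD 0 0, pyHeapSiftup (rest.set 0 lastelt) 0 0 lastelt)

-- A's while-loop; 'answer' stays -1 until the break branch returns temp_answer.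
-- fuel is only a totality guard: the heap shrinks by one each iteration, so
-- fuel = heap.length + 1 (supplied by solution) never runs out; the fuel-0 arm
-- coincides with the loop-exit action on the empty heap.
def solutionLoopGo (K : Int) : Nat → List Int → Int → Int → Int
  | 0, _, answer, _ => answer
  | fuel + 1, heap, answer, temp_answer =>
    if heap.length > 0 then
      if heap.getD 0 0 < K then
        if heap.length > 1 then
          let temp := heap.getD 0 0
          let p1 := pyHeappop heap
          let temp := temp + p1.2.getD 0 0 * 2
          let p2 := pyHeappop p1.2
          solutionLoopGo K fuel (pyHeappush p2.2 temp) answer (temp_answer + 1)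
        else solutionLoopGo K fuel (pyHeappop heap).2 answer temp_answer
      else temp_answer
    else answer

def solution (scoville : List Int) (K : Int) : Int :=
  let heap := scoville.foldl pyHeappush []
  solutionLoopGo K (heap.length + 1) heap (-1) 0

-- ===== PORT B =====
-- B's while-loop: linear min-scan, first-occurrence removal.  The 'none' match arms are
-- unreachable (min/remove of a nonempty list / of a member always succeed).  fuel is only
-- a totality guard: the pot shrinks by one each iteration, so fuel = pot.length + 1
-- (supplied by solution_alt) never runs out; the fuel-0 arm coincides with the
-- empty-pot exit.
def altGo (K : Int) : Nat → List Int → Int → Int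
  | 0, _, _ => -1
  | fuel + 1, pot, count =>
    match PySem.List.min? pot (fun x => x) with
    | none => -1
    | some m1 =>
      if m1 ≥ K then count
      else if pot.length = 1 then -1
      else
        match PySem.List.remove? pot m1 with
        | none => -1
        | some pot1 =>
          match PySem.List.min? pot1 (fun x => x) with
          | none => -1
          | some m2 =>
            match PySem.List.remove? pot1 m2 with
            | none => -1
            | some pot2 => altGo K fuel (pot2 ++ [m1 + 2 * m2]) (count + 1)

def solution_alt (scoville : List Int) (K : Int) : Int :=
  altGo K (scoville.length + 1) scoville 0

-- ===== PRECONDITION & SPEC =====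
def Spec_solution (scoville : List Int) (K : Int) (out : Int) : Prop := out = solution_alt scoville K
instance (scoville : List Int) (K : Int) (out : Int) : Decidable (Spec_solution scoville K out) := by unfold Spec_solution; infer_instance

-- ===== CLAIM (what is proved, stated in full; the proofs are below) =====
def Claim_equal_solution : Prop := ∀ (scoville : List Int) (K : Int), Dom_solution scoville K → Spec_solution scoville K (solution scoville K)

-- ===== LEMMAS AND PROOFS =====

-- the binary-heap property, on getD-indexing
def IsHeap (h : List Int) : Prop :=
  ∀ i, 0 < i → i < h.length → h.getD ((i - 1) / 2) 0 ≤ h.getD i 0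


-- small getD / set / Perm helpers

theorem getD_set_self (l : List Int) (i : Nat) (v : Int) (hi : i < l.length) :
    (l.set i v).getD i 0 = v := by
  simp [List.getD_eq_getElem?_getD, hi]

theorem getD_set_ne (l : List Int) (i j : Nat) (v : Int) (hij : i ≠ j) :
    (l.set i v).getD j 0 = l.getD j 0 := by
  simp [List.getD_eq_getElem?_getD, List.getElem?_set_ne, hij]

theorem getD_mem (l : List Int) (i : Nat) (hi : i < l.length) : l.getD i 0 ∈ l := by
  rw [List.getD_eq_getElem l 0 hi]; exact List.getElem_mem hi

theorem getD_append_left (l t : List Int) (i : Nat) (hi : i < l.length) :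
    (l ++ t).getD i 0 = l.getD i 0 := by
  rw [List.getD_eq_getElem _ 0 (by simp; omega), List.getD_eq_getElem l 0 hi,
    List.getElem_append_left hi]

theorem cons_set_perm : ∀ (t : List Int) (j : Nat) (x : Int), j < t.length →
    ((t.getD j 0) :: t.set j x).Perm (x :: t) := by
  intro t
  induction t with
  | nil => intro j x h; simp at h
  | cons b t ih =>
    intro j x h
    cases j with
    | zero => simpa using List.Perm.swap x b t
    | succ j =>
      simp only [List.getD_cons_succ, List.set_cons_succ]
      exact ((List.Perm.swap b (t.getD j 0) (t.set j x)).trans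
        ((ih j x (by simpa using h)).cons b)).trans (List.Perm.swap x b t)

theorem set_swap_perm (t : List Int) (i : Nat) (a x : Int) (hi : i < t.length) :
    (x :: t.set i a).Perm (a :: t.set i x) := by
  have h1 := cons_set_perm t i a hi
  have h2 := cons_set_perm t i x hi
  -- y :: t.set i a ~ a :: t,  y :: t.set i x ~ x :: t  with y := t.getD i 0
  have h3 : (t.getD i 0 :: x :: t.set i a).Perm (t.getD i 0 :: a :: t.set i x) :=
    (List.Perm.swap x (t.getD i 0) (t.set i a)).trans ((h1.cons x).trans
      ((List.Perm.swap a x t).trans ((h2.symm.cons a).trans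
        (List.Perm.swap (t.getD i 0) a (t.set i x)))))
  exact h3.cons_inv

theorem set_getD_set_perm : ∀ (l : List Int) (i j : Nat) (x : Int), i < l.length →
    j < l.length → i ≠ j → ((l.set i (l.getD j 0)).set j x).Perm (l.set i x) := by
  intro l
  induction l with
  | nil => intro i j x hi; simp at hi
  | cons b t ih =>
    intro i j x hi hj hij
    cases i with
    | zero =>
      cases j with
      | zero => exact absurd rfl hij
      | succ j =>
        simp only [List.getD_cons_succ, List.set_cons_zero, List.set_cons_succ]
        exact cons_set_perm t j x (by simpa using hj)
    | succ i =>
      cases j with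
      | zero =>
        simp only [List.getD_cons_zero, List.set_cons_succ, List.set_cons_zero]
        exact set_swap_perm t i b x (by simpa using hi)
      | succ j =>
        simp only [List.getD_cons_succ, List.set_cons_succ]
        exact (ih i j x (by simpa using hi) (by simpa using hj) (by omega)).cons b

theorem siftdownGo_length : ∀ (fuel : Nat) (h : List Int) (s p : Nat) (x : Int),
    (siftdownGo fuel h s p x).length = h.length := by
  intro fuel
  induction fuel with
  | zero => intro h s p x; simp [siftdownGo]
  | succ fuel IH =>
    intro h s p x
    simp only [siftdownGo]
    split
    · split
      · rw [IH]; simp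
      · simp
    · simp

theorem pyHeapSiftdown_length (h : List Int) (s p : Nat) (x : Int) :
    (pyHeapSiftdown h s p x).length = h.length := siftdownGo_length _ h s p x

theorem siftupGo_length : ∀ (fuel : Nat) (h : List Int) (s p : Nat) (x : Int),
    (siftupGo fuel h s p x).length = h.length := by
  intro fuel
  induction fuel with
  | zero => intro h s p x; simp [siftupGo, pyHeapSiftdown_length]
  | succ fuel IH =>
    intro h s p x
    simp only [siftupGo]
    split
    · rw [IH]; simp
    · simp [pyHeapSiftdown_length]

theorem pyHeapSiftup_length (h : List Int) (s p : Nat) (x : Int) :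
    (pyHeapSiftup h s p x).length = h.length := siftupGo_length _ h s p x

theorem pyHeappop_length (heap : List Int) (h : heap ≠ []) :
    (pyHeappop heap).2.length + 1 = heap.length := by
  rcases List.eq_nil_or_concat heap with rfl | ⟨l, a, rfl⟩
  · exact absurd rfl h
  · unfold pyHeappop
    simp only [List.concat_eq_append, List.getLast?_concat, List.dropLast_concat]
    by_cases hl : l = []
    · simp [hl]
    · simp [List.isEmpty_iff, hl, pyHeapSiftup_length, List.length_set]

theorem pyHeappush_length (heap : List Int) (x : Int) :
    (pyHeappush heap x).length = heap.length + 1 := by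
  simp [pyHeappush, pyHeapSiftdown_length]

theorem siftdownGo_perm : ∀ (fuel : Nat) (h : List Int) (s pos : Nat) (x : Int),
    pos < fuel → pos < h.length → (siftdownGo fuel h s pos x).Perm (h.set pos x) := by
  intro fuel
  induction fuel with
  | zero => intro h s pos x hf; omega
  | succ fuel IH =>
    intro h s pos x hf hlen
    simp only [siftdownGo]
    split
    · rename_i hsp
      split
      · refine (IH _ s ((pos - 1) / 2) x (by omega) (by simp [List.length_set]; omega)).trans ?_
        exact set_getD_set_perm h pos ((pos - 1) / 2) x hlen (by omega) (by omega)
      · exact List.Perm.refl _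
    · exact List.Perm.refl _

theorem siftdown_perm (pos : Nat) (h : List Int) (s : Nat) (x : Int) (hlen : pos < h.length) :
    (pyHeapSiftdown h s pos x).Perm (h.set pos x) :=
  siftdownGo_perm (pos + 1) h s pos x (by omega) hlen

theorem siftdownGo_heap : ∀ (fuel : Nat) (pos : Nat) (h : List Int) (x : Int),
    pos < fuel → pos < h.length →
    (∀ i, 0 < i → i < h.length → i ≠ pos → h.getD ((i - 1) / 2) 0 ≤ h.getD i 0) →
    (∀ i, 0 < i → i < h.length → (i - 1) / 2 = pos → x ≤ h.getD i 0) →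
    (∀ i, 0 < i → i < h.length → (i - 1) / 2 = pos → 0 < pos →
      h.getD ((pos - 1) / 2) 0 ≤ h.getD i 0) →
    IsHeap (siftdownGo fuel h 0 pos x) := by
  intro fuel
  induction fuel with
  | zero => intro pos h x hf; omega
  | succ fuel IH =>
    intro pos h x hf hlen ha hb hc
    simp only [siftdownGo]
    split
    · rename_i hsp
      have hpos : 0 < pos := hsp
      have hqlt : (pos - 1) / 2 < pos := by omega
      have hqlen : (pos - 1) / 2 < h.length := by omega
      split
      · rename_i hx
        -- recurse at the parent with h' = h.set pos (h.getD q 0)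
        refine IH ((pos - 1) / 2) (h.set pos (h.getD ((pos - 1) / 2) 0)) x (by omega)
          (by simp [List.length_set]; omega) ?_ ?_ ?_
        · -- (a') for i ≠ q
          intro i hi0 hilen hiq
          simp only [List.length_set] at hilen
          by_cases hip : i = pos
          · rw [hip, getD_set_self h pos _ hlen, getD_set_ne h pos ((pos - 1) / 2) _ (by omega)]
          · rw [getD_set_ne h pos i _ (by omega)]
            by_cases hpar : (i - 1) / 2 = pos
            · rw [hpar, getD_set_self h pos _ hlen]
              exact hc i hi0 hilen hpar hpos
            · rw [getD_set_ne h pos _ _ (by omega)]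
              exact ha i hi0 hilen hip
        · -- (b') children of q dominate x
          intro i hi0 hilen hiq
          simp only [List.length_set] at hilen
          by_cases hip : i = pos
          · rw [hip, getD_set_self h pos _ hlen]; exact le_of_lt hx
          · rw [getD_set_ne h pos i _ (by omega)]
            have := ha i hi0 hilen hip
            rw [hiq] at this
            exact le_trans (le_of_lt hx) this
        · -- (c') grandparent of q bridges its children
          intro i hi0 hilen hiq hq0
          simp only [List.length_set] at hilen
          have hgq : ((pos - 1) / 2 - 1) / 2 ≠ pos := by omega
          rw [getD_set_ne h pos _ _ (by omega)]
          by_cases hip : i = pos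
          · rw [hip, getD_set_self h pos _ hlen]
            exact ha ((pos - 1) / 2) hq0 hqlen (by omega)
          · rw [getD_set_ne h pos i _ (by omega)]
            have h1 := ha ((pos - 1) / 2) hq0 hqlen (by omega)
            have h2 := ha i hi0 hilen hip
            rw [hiq] at h2
            exact le_trans h1 h2
      · rename_i hx
        -- place x at pos
        intro i hi0 hilen
        simp only [List.length_set] at hilen
        by_cases hip : i = pos
        · rw [hip, getD_set_self h pos _ hlen]
          rw [getD_set_ne h pos ((pos - 1) / 2) _ (by omega)]
          omega
        · rw [getD_set_ne h pos i _ (by omega)]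
          by_cases hpar : (i - 1) / 2 = pos
          · rw [hpar, getD_set_self h pos _ hlen]
            exact hb i hi0 hilen hpar
          · rw [getD_set_ne h pos _ _ (by omega)]
            exact ha i hi0 hilen hip
    · rename_i hsp
      have hpos : pos = 0 := by omega
      subst hpos
      intro i hi0 hilen
      simp only [List.length_set] at hilen
      have hip : i ≠ 0 := by omega
      rw [getD_set_ne h 0 i _ (by omega)]
      by_cases hpar : (i - 1) / 2 = 0
      · rw [hpar, getD_set_self h 0 _ hlen]
        exact hb i hi0 hilen hpar
      · rw [getD_set_ne h 0 _ _ (by omega)]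
        exact ha i hi0 hilen hip

theorem siftdown_heap (pos : Nat) (h : List Int) (x : Int) (hlen : pos < h.length)
    (ha : ∀ i, 0 < i → i < h.length → i ≠ pos → h.getD ((i - 1) / 2) 0 ≤ h.getD i 0)
    (hb : ∀ i, 0 < i → i < h.length → (i - 1) / 2 = pos → x ≤ h.getD i 0)
    (hc : ∀ i, 0 < i → i < h.length → (i - 1) / 2 = pos → 0 < pos →
      h.getD ((pos - 1) / 2) 0 ≤ h.getD i 0) :
    IsHeap (pyHeapSiftdown h 0 pos x) :=
  siftdownGo_heap (pos + 1) pos h x (by omega) hlen ha hb hc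

theorem siftupGo_perm (k : Nat) : ∀ (h : List Int) (pos : Nat) (x : Int),
    h.length ≤ pos + k → pos < h.length →
    (siftupGo k h 0 pos x).Perm (h.set pos x) := by
  induction k with
  | zero => intro h pos x hk hlen; omega
  | succ k IH =>
    intro h pos x hk hlen
    simp only [siftupGo]
    split
    · rename_i hc
      set c := if 2 * pos + 1 + 1 < h.length ∧ ¬h.getD (2 * pos + 1) 0 < h.getD (2 * pos + 1 + 1) 0
        then 2 * pos + 1 + 1 else 2 * pos + 1 with hcdef
      have hclen : c < h.length := by
        rw [hcdef]; split <;> omega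
      have hcpos : pos < c := by rw [hcdef]; split <;> omega
      refine (IH _ c x (by simp [List.length_set]; omega) (by simp [List.length_set]; omega)).trans ?_
      exact set_getD_set_perm h pos c x hlen hclen (by omega)
    · refine (siftdown_perm pos (h.set pos x) 0 x (by simp [List.length_set]; omega)).trans ?_
      rw [List.set_set]

theorem siftup_perm (k : Nat) : ∀ (h : List Int) (pos : Nat) (x : Int),
    h.length ≤ pos + k → pos < h.length →
    (pyHeapSiftup h 0 pos x).Perm (h.set pos x) := by
  intro h pos x hk hlen
  exact siftupGo_perm (h.length + 1) h pos x (by omega) hlen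

theorem siftupGo_heap (k : Nat) : ∀ (h : List Int) (pos : Nat) (x : Int),
    h.length ≤ pos + k → pos < h.length →
    (∀ i, 0 < i → i < h.length → i ≠ pos → (i - 1) / 2 ≠ pos →
      h.getD ((i - 1) / 2) 0 ≤ h.getD i 0) →
    (∀ i, 0 < i → i < h.length → (i - 1) / 2 = pos → 0 < pos →
      h.getD ((pos - 1) / 2) 0 ≤ h.getD i 0) →
    IsHeap (siftupGo k h 0 pos x) := by
  induction k with
  | zero => intro h pos x hk hlen; omega
  | succ k IH =>
    intro h pos x hk hlen ha hb
    simp only [siftupGo]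
    split
    · rename_i hch
      set c := if 2 * pos + 1 + 1 < h.length ∧ ¬h.getD (2 * pos + 1) 0 < h.getD (2 * pos + 1 + 1) 0
        then 2 * pos + 1 + 1 else 2 * pos + 1 with hcdef
      have hclen : c < h.length := by rw [hcdef]; split <;> omega
      have hcpos : pos < c := by rw [hcdef]; split <;> omega
      have hcchild : (c - 1) / 2 = pos := by rw [hcdef]; split <;> omega
      -- the chosen child is the smaller one
      have hsmall : ∀ o, 0 < o → o < h.length → (o - 1) / 2 = pos → h.getD c 0 ≤ h.getD o 0 := by
        intro o ho0 holen hopar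
        have hoo : o = 2 * pos + 1 ∨ o = 2 * pos + 1 + 1 := by omega
        rw [hcdef]
        rcases hoo with rfl | rfl
        · split
          · rename_i hcond; omega
          · omega
        · split
          · omega
          · rename_i hcond
            have : h.getD (2 * pos + 1) 0 < h.getD (2 * pos + 1 + 1) 0 := by
              by_contra hno
              exact hcond ⟨by omega, hno⟩
            omega
      refine IH (h.set pos (h.getD c 0)) c x (by simp [List.length_set]; omega)
        (by simp [List.length_set]; omega) ?_ ?_
      · -- (Da') for hole c
        intro i hi0 hilen hic hiparc
        simp only [List.length_set] at hilen
        by_cases hip : i = pos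
        · -- i = pos: use the bridging hypothesis at c
          rw [hip, getD_set_self h pos _ hlen]
          have hppos : 0 < pos := by
            rcases Nat.eq_zero_or_pos pos with h0 | h0
            · exfalso; rw [hip, h0] at hi0; omega
            · exact h0
          rw [getD_set_ne h pos ((pos - 1) / 2) _ (by omega)]
          exact hb c (by omega) hclen hcchild hppos
        · by_cases hpar : (i - 1) / 2 = pos
          · -- i is the other child of pos
            rw [getD_set_ne h pos i _ (by omega), hpar, getD_set_self h pos _ hlen]
            exact hsmall i hi0 hilen hpar
          · rw [getD_set_ne h pos i _ (by omega), getD_set_ne h pos _ _ (by omega)]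
            exact ha i hi0 hilen hip hpar
      · -- (Db') grandparent bridging for hole c
        intro i hi0 hilen hipar hc0
        simp only [List.length_set] at hilen
        rw [hcchild, getD_set_self h pos _ hlen, getD_set_ne h pos i _ (by omega)]
        have := ha i hi0 hilen (by omega) (by omega)
        rw [hipar] at this
        exact this
    · rename_i hch
      -- no children: place x at pos and sift it up
      refine siftdown_heap pos (h.set pos x) x (by simp [List.length_set]; omega) ?_ ?_ ?_
      · intro i hi0 hilen hip
        simp only [List.length_set] at hilen
        have hpar : (i - 1) / 2 ≠ pos := by omega
        rw [getD_set_ne h pos i _ (by omega), getD_set_ne h pos _ _ (by omega)]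
        exact ha i hi0 hilen hip hpar
      · intro i hi0 hilen hipar
        simp only [List.length_set] at hilen
        omega
      · intro i hi0 hilen hipar hp0
        simp only [List.length_set] at hilen
        omega

theorem siftup_heap (k : Nat) : ∀ (h : List Int) (pos : Nat) (x : Int),
    h.length ≤ pos + k → pos < h.length →
    (∀ i, 0 < i → i < h.length → i ≠ pos → (i - 1) / 2 ≠ pos →
      h.getD ((i - 1) / 2) 0 ≤ h.getD i 0) →
    (∀ i, 0 < i → i < h.length → (i - 1) / 2 = pos → 0 < pos →
      h.getD ((pos - 1) / 2) 0 ≤ h.getD i 0) →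
    IsHeap (pyHeapSiftup h 0 pos x) := by
  intro h pos x hk hlen ha hb
  exact siftupGo_heap (h.length + 1) h pos x (by omega) hlen ha hb

theorem push_spec (h : List Int) (x : Int) (hh : IsHeap h) :
    IsHeap (pyHeappush h x) ∧ (pyHeappush h x).Perm (x :: h) := by
  constructor
  · refine siftdown_heap h.length (h ++ [x]) x (by simp) ?_ ?_ ?_
    · intro i hi0 hilen hip
      simp only [List.length_append, List.length_cons, List.length_nil] at hilen
      have hi : i < h.length := by omega
      rw [getD_append_left h [x] i hi, getD_append_left h [x] _ (by omega)]
      exact hh i hi0 hi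
    · intro i hi0 hilen hipar
      simp only [List.length_append, List.length_cons, List.length_nil] at hilen
      omega
    · intro i hi0 hilen hipar hp
      simp only [List.length_append, List.length_cons, List.length_nil] at hilen
      omega
  · refine (siftdown_perm h.length (h ++ [x]) 0 x (by simp)).trans ?_
    have : (h ++ [x]).set h.length x = h ++ [x] := by
      induction h with
      | nil => rfl
      | cons a t ih => simp
    rw [this]
    exact List.perm_append_singleton x h

theorem pop_spec (h : List Int) (hne : h ≠ []) (hh : IsHeap h) :
    (pyHeappop h).1 = h.getD 0 0 ∧ IsHeap (pyHeappop h).2 ∧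
      h.Perm ((pyHeappop h).1 :: (pyHeappop h).2) := by
  rcases List.eq_nil_or_concat h with rfl | ⟨l, a, rfl⟩
  · exact absurd rfl hne
  · unfold pyHeappop
    simp only [List.concat_eq_append, List.getLast?_concat, List.dropLast_concat]
    by_cases hl : l = []
    · subst hl
      refine ⟨rfl, ?_, by simp⟩
      simp only [List.isEmpty_nil, if_true]
      intro i hi0 hilen; simp at hilen
    · have hlpos : 0 < l.length := List.length_pos_of_ne_nil hl
      simp only [List.isEmpty_iff, hl, if_false]
      have hgetD0 : (l ++ [a]).getD 0 0 = l.getD 0 0 := getD_append_left l [a] 0 hlpos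
      have hprefix : ∀ i, i < l.length → (l ++ [a]).getD i 0 = l.getD i 0 := fun i hi =>
        getD_append_left l [a] i hi
      refine ⟨hgetD0.symm, ?_, ?_⟩
      · refine siftup_heap (l.set 0 a).length (l.set 0 a) 0 a (by omega)
          (by simp [List.length_set]; omega) ?_ ?_
        · intro i hi0 hilen hip hipar
          simp only [List.length_set] at hilen
          rw [getD_set_ne l 0 i _ (by omega), getD_set_ne l 0 _ _ (by omega)]
          have := hh i hi0 (by simp; omega)
          simp only [List.concat_eq_append] at this
          rw [hprefix i hilen, hprefix _ (by omega)] at this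
          exact this
        · intro i hi0 hilen hipar hp0; omega
      · -- (l ++ [a]).Perm (l.getD 0 0 :: siftup …)
        have hsift : (pyHeapSiftup (l.set 0 a) 0 0 a).Perm ((l.set 0 a).set 0 a) :=
          siftup_perm (l.set 0 a).length (l.set 0 a) 0 a (by omega)
            (by simp [List.length_set]; omega)
        rw [List.set_set] at hsift
        refine ((List.perm_append_singleton a l).trans ?_).trans
          ((hsift.symm.cons (l.getD 0 0)))
        exact (cons_set_perm l 0 a hlpos).symm

theorem root_min (h : List Int) (hh : IsHeap h) :
    ∀ i, i < h.length → h.getD 0 0 ≤ h.getD i 0 := by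
  intro i
  induction i using Nat.strong_induction_on with
  | _ i IH =>
    intro hi
    rcases Nat.eq_zero_or_pos i with rfl | hpos
    · exact le_rfl
    · exact le_trans (IH ((i - 1) / 2) (by omega) (by omega)) (hh i hpos hi)

theorem root_le_mem (h : List Int) (hh : IsHeap h) : ∀ y ∈ h, h.getD 0 0 ≤ y := by
  intro y hy
  obtain ⟨i, hi, rfl⟩ := List.getElem_of_mem hy
  rw [← List.getD_eq_getElem h 0 hi]
  exact root_min h hh i hi

theorem min_eq_root (h l : List Int) (hh : IsHeap h) (hp : h.Perm l) (hne : h ≠ []) :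
    PySem.List.min? l (fun x => x) = some (h.getD 0 0) := by
  have hlne : l ≠ [] := by
    intro hl; rw [hl] at hp; exact hne (List.Perm.eq_nil hp)
  match hm : PySem.List.min? l (fun x => x) with
  | none => exact absurd ((PySem.List.min?_eq_none_iff l _).mp hm) hlne
  | some m =>
    have hmem : m ∈ l := PySem.List.min?_mem hm
    have hmin : ∀ y ∈ l, m ≤ y := PySem.List.min?_isMin hm
    have h1 : h.getD 0 0 ≤ m := root_le_mem h hh m (hp.mem_iff.mpr hmem)
    have h2 : m ≤ h.getD 0 0 :=
      hmin _ (hp.mem_iff.mp (getD_mem h 0 (List.length_pos_of_ne_nil hne)))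
    rw [le_antisymm h2 h1]

theorem altGo_nil (K : Int) (kB : Nat) (cnt : Int) : altGo K kB [] cnt = -1 := by
  cases kB with
  | zero => rfl
  | succ kB =>
    rw [altGo]
    have hm : PySem.List.min? ([] : List Int) (fun x => x) = none :=
      (PySem.List.min?_eq_none_iff _ _).mpr rfl
    rw [hm]

theorem loopGo_nil (K : Int) (kA : Nat) (a cnt : Int) : solutionLoopGo K kA [] a cnt = a := by
  cases kA with
  | zero => rfl
  | succ kA => rw [solutionLoopGo]; simp

theorem loop_eq (K : Int) (n : Nat) : ∀ (kA kB : Nat) (h l : List Int) (cnt : Int),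
    h.length ≤ n → h.length < kA → l.length < kB → IsHeap h → h.Perm l →
    solutionLoopGo K kA h (-1) cnt = altGo K kB l cnt := by
  induction n with
  | zero =>
    intro kA kB h l cnt hk hkA hkB hh hp
    have hhe : h = [] := List.eq_nil_of_length_eq_zero (by omega)
    subst hhe
    rw [hp.symm.eq_nil, loopGo_nil, altGo_nil]
  | succ n IH =>
    intro kA kB h l cnt hk hkA hkB hh hp
    by_cases hne : h = []
    · subst hne
      rw [hp.symm.eq_nil, loopGo_nil, altGo_nil]
    · have hlen : h.length > 0 := List.length_pos_of_ne_nil hne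
      have hllen : l.length = h.length := hp.length_eq.symm
      match kA, kB with
      | kA + 1, kB + 1 =>
        have hmin := min_eq_root h l hh hp hne
        rw [solutionLoopGo, altGo]
        rw [hmin]
        dsimp only
        by_cases hKr : h.getD 0 0 < K
        · rw [if_neg (by omega : ¬ h.getD 0 0 ≥ K), if_pos hlen, if_pos hKr]
          by_cases hone : h.length > 1
          · rw [if_pos hone, if_neg (by omega : ¬ l.length = 1)]
            obtain ⟨hv1, hh1, hp1⟩ := pop_spec h hne hh
            have hlen1 : (pyHeappop h).2.length + 1 = h.length := pyHeappop_length h hne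
            have h1ne : (pyHeappop h).2 ≠ [] := by
              intro e; rw [e] at hlen1; simp at hlen1; omega
            obtain ⟨hv2, hh2, hp2⟩ := pop_spec (pyHeappop h).2 h1ne hh1
            have hlen2 : (pyHeappop (pyHeappop h).2).2.length + 1 = (pyHeappop h).2.length :=
              pyHeappop_length _ h1ne
            have hrootmem : h.getD 0 0 ∈ l := hp.mem_iff.mp (getD_mem h 0 hlen)
            rw [PySem.List.remove?_eq_some_erase l _ hrootmem]
            dsimp only
            have hperm1 : (pyHeappop h).2.Perm (l.erase (h.getD 0 0)) := by
              have hc : (h.getD 0 0 :: (pyHeappop h).2).Perm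
                  (h.getD 0 0 :: l.erase (h.getD 0 0)) :=
                (hv1 ▸ hp1.symm).trans (hp.trans (List.perm_cons_erase hrootmem))
              exact hc.cons_inv
            have hmin2 := min_eq_root (pyHeappop h).2 (l.erase (h.getD 0 0)) hh1 hperm1 h1ne
            rw [hmin2]
            dsimp only
            have hm2mem : (pyHeappop h).2.getD 0 0 ∈ l.erase (h.getD 0 0) :=
              hperm1.mem_iff.mp (getD_mem _ 0 (by omega))
            rw [PySem.List.remove?_eq_some_erase _ _ hm2mem]
            dsimp only
            have hperm2 : (pyHeappop (pyHeappop h).2).2.Perm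
                ((l.erase (h.getD 0 0)).erase ((pyHeappop h).2.getD 0 0)) := by
              have hc : ((pyHeappop h).2.getD 0 0 :: (pyHeappop (pyHeappop h).2).2).Perm
                  ((pyHeappop h).2.getD 0 0 ::
                    (l.erase (h.getD 0 0)).erase ((pyHeappop h).2.getD 0 0)) :=
                (hv2 ▸ hp2.symm).trans (hperm1.trans (List.perm_cons_erase hm2mem))
              exact hc.cons_inv
            obtain ⟨hpush_heap, hpush_perm⟩ :=
              push_spec (pyHeappop (pyHeappop h).2).2
                (h.getD 0 0 + (pyHeappop h).2.getD 0 0 * 2) hh2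
            have hpperm : (pyHeappush (pyHeappop (pyHeappop h).2).2
                (h.getD 0 0 + (pyHeappop h).2.getD 0 0 * 2)).Perm
                ((l.erase (h.getD 0 0)).erase ((pyHeappop h).2.getD 0 0) ++
                  [h.getD 0 0 + (pyHeappop h).2.getD 0 0 * 2]) :=
              hpush_perm.trans ((hperm2.cons _).trans
                (List.perm_append_singleton _ _).symm)
            rw [show h.getD 0 0 + 2 * (pyHeappop h).2.getD 0 0 =
              h.getD 0 0 + (pyHeappop h).2.getD 0 0 * 2 from by ring]
            have herase1 : (l.erase (h.getD 0 0)).length + 1 = l.length := by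
              have := List.length_erase_of_mem hrootmem
              omega
            have herase2 : ((l.erase (h.getD 0 0)).erase ((pyHeappop h).2.getD 0 0)).length + 1 =
                (l.erase (h.getD 0 0)).length := by
              have := List.length_erase_of_mem hm2mem
              omega
            refine IH kA kB _ _ (cnt + 1) ?_ ?_ ?_ hpush_heap hpperm
            · rw [pyHeappush_length]; omega
            · rw [pyHeappush_length]; omega
            · simp only [List.length_append, List.length_cons, List.length_nil]; omega
          · rw [if_neg hone, if_pos (by omega : l.length = 1)]
            have hz : (pyHeappop h).2.length = 0 := by
              have := pyHeappop_length h hne; omega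
            rw [List.eq_nil_of_length_eq_zero hz, loopGo_nil]
        · rw [if_pos (by omega : h.getD 0 0 ≥ K), if_pos hlen, if_neg hKr]

theorem build_heap (xs : List Int) : ∀ (h : List Int), IsHeap h →
    IsHeap (xs.foldl pyHeappush h) ∧ (xs.foldl pyHeappush h).Perm (h ++ xs) := by
  induction xs with
  | nil => intro h hh; exact ⟨hh, by simp⟩
  | cons x xs ih =>
    intro h hh
    obtain ⟨hph, hpp⟩ := push_spec h x hh
    obtain ⟨ih1, ih2⟩ := ih (pyHeappush h x) hph
    refine ⟨ih1, ih2.trans ?_⟩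
    exact (hpp.append_right xs).trans List.perm_middle.symm

theorem solution_spec : Claim_equal_solution := by
  unfold Claim_equal_solution Spec_solution
  intro scoville K _
  unfold solution solution_alt
  obtain ⟨hh, hperm⟩ := build_heap scoville [] (by intro i hi0 hilen; simp at hilen)
  have hperm' : (scoville.foldl pyHeappush []).Perm scoville := by simpa using hperm
  exact loop_eq K (scoville.foldl pyHeappush []).length _ _ _ _ 0 le_rfl
    (by omega) (by omega) hh hperm'
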